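-- pv_equiv track=rewrite | github.com/981377660LMT/algorithm-study | 15_双指针/经典题/差值大于target的二元组个数.py | solve
-- ===== SOURCE A (Python) =====
-- def solve(nums, target):
--     def check(mid):
--         return all(nums[-mid + i] - nums[i] >= target for i in range(mid))
--
--     nums.sort()
--     left, right = 0, len(nums) // 2
--     while left <= right:
--         mid = (left + right) // 2
--         if check(mid):
--             left = mid + 1
--         else:
--             right = mid - 1
--     return right
-- ===== SOURCE B (Python) =====
-- def solve(nums, target):
--     nums.sort()
--     n = len(nums)
--     i = 0
--     for j in range(n - n // 2, n):
--         if nums[j] - nums[i] >= target: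
--             i += 1
--     return i
-- ===== Notes on version B (the rewrite author's own statement) =====
-- stated objective: faster
-- what changed: Replaces the binary search over the pair count (each probe re-checking up to n/2 aligned pairs) by a single greedy two-pointer pass over the sorted array's top half, counting pairs directly.
import Mathlib
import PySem

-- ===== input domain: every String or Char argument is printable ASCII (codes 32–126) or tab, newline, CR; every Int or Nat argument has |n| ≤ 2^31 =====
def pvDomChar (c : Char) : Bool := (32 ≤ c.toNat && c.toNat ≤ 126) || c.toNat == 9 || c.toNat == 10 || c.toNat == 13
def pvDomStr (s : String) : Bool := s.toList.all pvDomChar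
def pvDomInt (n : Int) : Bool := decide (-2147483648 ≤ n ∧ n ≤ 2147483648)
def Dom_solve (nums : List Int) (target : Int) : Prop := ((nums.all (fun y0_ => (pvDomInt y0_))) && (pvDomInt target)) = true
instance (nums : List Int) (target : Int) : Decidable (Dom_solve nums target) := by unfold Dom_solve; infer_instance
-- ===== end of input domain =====

-- B replaces A's binary search on the pair count by one greedy two-pointer pass (simpler).
-- Both Pythons sort nums in place; the equivalence proved here is about the return value.

-- ===== PORT A =====
-- check(mid): all(nums[-mid+i] - nums[i] >= target for i in range(mid)).
-- Indices are always in range at A's call sites (0 ≤ i < mid ≤ len//2), so pyGetD is exact here.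
def solveCheck (a : List Int) (target : Int) (mid : Int) : Bool :=
  (PySem.List.pyRange 0 mid).all (fun i =>
    decide (PySem.List.pyGetD a (-mid + i) 0 - PySem.List.pyGetD a i 0 ≥ target))

-- the while-loop of A: left/right binary search returning right
def solveLoop (a : List Int) (target : Int) (left right : Int) : Int :=
  if h : left ≤ right then
    if solveCheck a target (PySem.Int.floordiv (left + right) 2) then
      solveLoop a target (PySem.Int.floordiv (left + right) 2 + 1) right
    else
      solveLoop a target left (PySem.Int.floordiv (left + right) 2 - 1)
  else right
termination_by (right + 1 - left).toNat
decreasing_by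
  · have hb := PySem.Int.floordiv_two_mid_bounds h; omega
  · have hb := PySem.Int.floordiv_two_mid_bounds h; omega

def solve (nums : List Int) (target : Int) : Int :=
  let a := PySem.List.sorted nums id
  solveLoop a target 0 (PySem.Int.floordiv (a.length : Int) 2)

-- ===== PORT B =====
-- sort; i = 0; for j in range(n - n//2, n): if a[j] - a[i] >= target: i += 1; return i
def solve_alt (nums : List Int) (target : Int) : Int :=
  let a := PySem.List.sorted nums id
  let n : Int := (a.length : Int)
  (PySem.List.pyRange (n - PySem.Int.floordiv n 2) n).foldl
    (fun i j =>
      if PySem.List.pyGetD a j 0 - PySem.List.pyGetD a i 0 ≥ target then i + 1 else i) 0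

-- ===== PRECONDITION & SPEC =====
def Spec_solve (nums : List Int) (target : Int) (out : Int) : Prop := out = solve_alt nums target
instance (nums : List Int) (target : Int) (out : Int) : Decidable (Spec_solve nums target out) := by unfold Spec_solve; infer_instance

-- ===== CLAIM (what is proved, stated in full; the proofs are below) =====
def Claim_equal_solve : Prop := ∀ (nums : List Int) (target : Int), Dom_solve nums target → Spec_solve nums target (solve nums target)

-- ===== LEMMAS AND PROOFS =====

-- value of the sorted list at index k (0 outside; all uses are in range)
def pvV (a : List Int) (k : Nat) : Int := a.getD k 0

-- the aligned-pairing predicate that A's check computes, in Nat form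
def pvP (a : List Int) (t : Int) (m : Nat) : Prop :=
  ∀ i < m, pvV a (a.length - m + i) - pvV a i ≥ t

-- the greedy count after processing the first k elements of the top half
def pvG (a : List Int) (t : Int) : Nat → Nat
  | 0 => 0
  | k + 1 =>
    let c := pvG a t k
    if pvV a (a.length - a.length / 2 + k) - pvV a c ≥ t then c + 1 else c

lemma pvV_mono (a : List Int) (ha : a.Pairwise (· ≤ ·)) {j k : Nat}
    (hjk : j ≤ k) (hk : k < a.length) : pvV a j ≤ pvV a k := by
  rcases Nat.lt_or_ge j k with h | h
  · have := (List.pairwise_iff_getElem.1 ha) j k (by omega) hk h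
    simpa [pvV, List.getD_eq_getElem?_getD, List.getElem?_eq_getElem, hk,
      show j < a.length by omega] using this
  · have : j = k := by omega
    subst this; rfl

lemma pvG_le (a : List Int) (t : Int) : ∀ k, pvG a t k ≤ k := by
  intro k; induction k with
  | zero => simp [pvG]
  | succ k ih => simp only [pvG]; split_ifs <;> omega

lemma pvG_succ_bounds (a : List Int) (t : Int) (k : Nat) :
    pvG a t k ≤ pvG a t (k + 1) ∧ pvG a t (k + 1) ≤ pvG a t k + 1 := by
  simp only [pvG]; split_ifs <;> omega

-- invariant: after k steps with count c, the last-c-so-far pairing works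
lemma pvG_inv (a : List Int) (t : Int) (ha : a.Pairwise (· ≤ ·)) :
    ∀ k, k ≤ a.length / 2 →
      ∀ i < pvG a t k,
        pvV a (a.length - a.length / 2 + k - pvG a t k + i) - pvV a i ≥ t := by
  have hN : a.length / 2 ≤ a.length := Nat.div_le_self _ _
  intro k
  induction k with
  | zero => intro _ i hi; simp [pvG] at hi
  | succ k ih =>
    intro hk i hi
    have hc := pvG_le a t k
    have ih' := ih (by omega)
    by_cases hpair : pvV a (a.length - a.length / 2 + k) - pvV a (pvG a t k) ≥ t
    · have hg : pvG a t (k + 1) = pvG a t k + 1 := by simp only [pvG]; rw [if_pos hpair]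
      rw [hg] at hi ⊢
      rcases Nat.lt_or_ge i (pvG a t k) with h | h
      · have := ih' i h
        have heq : a.length - a.length / 2 + (k + 1) - (pvG a t k + 1) + i
            = a.length - a.length / 2 + k - pvG a t k + i := by omega
        rw [heq]; exact this
      · have hieq : i = pvG a t k := by omega
        have heq : a.length - a.length / 2 + (k + 1) - (pvG a t k + 1) + i
            = a.length - a.length / 2 + k := by omega
        rw [heq, hieq]; exact hpair
    · have hg : pvG a t (k + 1) = pvG a t k := by simp only [pvG]; rw [if_neg hpair]
      rw [hg] at hi ⊢
      have := ih' i hi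
      have hmono : pvV a (a.length - a.length / 2 + k - pvG a t k + i)
          ≤ pvV a (a.length - a.length / 2 + (k + 1) - pvG a t k + i) := by
        apply pvV_mono a ha (by omega)
        omega
      omega

-- the greedy result satisfies the aligned pairing
lemma pvP_of_G (a : List Int) (t : Int) (ha : a.Pairwise (· ≤ ·)) :
    pvP a t (pvG a t (a.length / 2)) := by
  have hN : a.length / 2 ≤ a.length := Nat.div_le_self _ _
  have hc := pvG_le a t (a.length / 2)
  intro i hi
  have := pvG_inv a t ha (a.length / 2) le_rfl i hi
  have heq : a.length - a.length / 2 + a.length / 2 - pvG a t (a.length / 2) + i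
      = a.length - pvG a t (a.length / 2) + i := by omega
  rwa [heq] at this

-- maximality: any m with a working aligned pairing is at most the greedy count
lemma pvG_max (a : List Int) (t : Int) (_ha : a.Pairwise (· ≤ ·))
    (m : Nat) (hm : m ≤ a.length / 2) (hP : pvP a t m) :
    ∀ k ≤ a.length / 2, m ≤ pvG a t k + (a.length / 2 - k) := by
  have hN : a.length / 2 ≤ a.length := Nat.div_le_self _ _
  intro k
  induction k with
  | zero => intro _; simp only [pvG]; omega
  | succ k ih =>
    intro hk
    have ih' := ih (by omega)
    have hb := pvG_succ_bounds a t k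
    by_cases hpair : pvV a (a.length - a.length / 2 + k) - pvV a (pvG a t k) ≥ t
    · have hg : pvG a t (k + 1) = pvG a t k + 1 := by simp only [pvG]; rw [if_pos hpair]
      omega
    · have hg : pvG a t (k + 1) = pvG a t k := by simp only [pvG]; rw [if_neg hpair]
      -- if the greedy skipped, m cannot need this slot: else check m gives a pair here
      by_contra hlt
      have hmk : m = pvG a t k + (a.length / 2 - k) := by omega
      have hiltm : pvG a t k < m := by omega
      have := hP (pvG a t k) hiltm
      have heq : a.length - m + pvG a t k = a.length - a.length / 2 + k := by omega
      rw [heq] at this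
      exact hpair this

-- downward monotonicity of the aligned pairing (on a sorted list)
lemma pvP_mono (a : List Int) (t : Int) (ha : a.Pairwise (· ≤ ·))
    {m' m : Nat} (h : m' ≤ m) (hm : m ≤ a.length) (hP : pvP a t m) : pvP a t m' := by
  intro i hi
  have h1 := hP i (by omega)
  have hmono : pvV a (a.length - m + i) ≤ pvV a (a.length - m' + i) := by
    apply pvV_mono a ha (by omega)
    omega
  omega

lemma getElem_eq_pvV (a : List Int) (n : Nat) (h : n < a.length) : a[n]'h = pvV a n := by
  simp [pvV, List.getD_eq_getElem?_getD, h]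

-- A's check at a Nat argument computes pvP
lemma check_iff (a : List Int) (t : Int) (m : Nat) (hm : m ≤ a.length) :
    (solveCheck a t (m : Int) = true ↔ pvP a t m) := by
  unfold solveCheck
  rw [PySem.List.pyRange_zero_natCast]
  simp only [List.all_map, List.all_eq_true, List.mem_range, Function.comp,
    decide_eq_true_eq]
  constructor
  · intro h i hi
    have := h i hi
    have hidx : (-(m : Int) + (i : Int)) = -(((m - i : Nat) : Int)) := by omega
    rw [hidx, PySem.List.pyGetD_neg_natCast a (m - i) 0 (by omega) (by omega),
      PySem.List.pyGetD_natCast] at this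
    simp only [getElem_eq_pvV] at this
    have heq : a.length - (m - i) = a.length - m + i := by omega
    rw [heq] at this
    simpa [pvV] using this
  · intro h i hi
    have := h i hi
    have hidx : (-(m : Int) + (i : Int)) = -(((m - i : Nat) : Int)) := by omega
    rw [hidx, PySem.List.pyGetD_neg_natCast a (m - i) 0 (by omega) (by omega),
      PySem.List.pyGetD_natCast]
    simp only [getElem_eq_pvV]
    have heq : a.length - (m - i) = a.length - m + i := by omega
    rw [heq]
    simpa [pvV] using this

-- B's fold computes the greedy recursion
lemma fold_eq_pvG (a : List Int) (t : Int) :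
    ∀ k, k ≤ a.length / 2 →
      (PySem.List.pyRange ((a.length - a.length / 2 : Nat) : Int)
          ((a.length - a.length / 2 + k : Nat) : Int)).foldl
        (fun i j =>
          if PySem.List.pyGetD a j 0 - PySem.List.pyGetD a i 0 ≥ t then i + 1 else i) 0
      = ((pvG a t k : Nat) : Int) := by
  intro k
  induction k with
  | zero =>
    intro _
    rw [PySem.List.pyRange_one_eq_nil (by omega)]
    simp [pvG]
  | succ k ih =>
    intro hk
    have hcast : ((a.length - a.length / 2 + (k + 1) : Nat) : Int)
        = ((a.length - a.length / 2 + k : Nat) : Int) + 1 := by push_cast; ring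
    rw [hcast, PySem.List.pyRange_one_succ_right (by omega), List.foldl_append,
      List.foldl_cons, List.foldl_nil, ih (by omega)]
    rw [PySem.List.pyGetD_natCast, PySem.List.pyGetD_natCast]
    simp only [pvG, pvV, ge_iff_le]
    split_ifs <;> push_cast <;> ring

-- the binary-search loop returns the greedy count, under its invariants
lemma solveLoop_eq (a : List Int) (t : Int) (ha : a.Pairwise (· ≤ ·)) :
    ∀ (fuel : Nat) (l r : Int), (r + 1 - l).toNat ≤ fuel → 0 ≤ l →
      l ≤ ((a.length / 2 : Nat) : Int) + 1 →
      r ≤ ((a.length / 2 : Nat) : Int) →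
      (l = 0 ∨ ∃ m : Nat, (m : Int) = l - 1 ∧ pvP a t m) →
      (∀ m : Nat, r < (m : Int) → m ≤ a.length / 2 → ¬ pvP a t m) →
      solveLoop a t l r = ((pvG a t (a.length / 2) : Nat) : Int) := by
  have hN : a.length / 2 ≤ a.length := Nat.div_le_self _ _
  have hPM := pvP_of_G a t ha
  have hGle := pvG_le a t (a.length / 2)
  intro fuel
  induction fuel with
  | zero =>
    intro l r hfuel hl hlh hr h1 h2
    have hrl : r < l := by omega
    rw [solveLoop, dif_neg (by omega)]
    -- at termination the returned right equals the greedy maximum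
    have hMr : ((pvG a t (a.length / 2) : Nat) : Int) ≤ r := by
      by_contra hc
      exact h2 (pvG a t (a.length / 2)) (by omega) hGle hPM
    rcases h1 with h0 | ⟨m, hm, hPm⟩
    · omega
    · have hmh : m ≤ a.length / 2 := by omega
      have := pvG_max a t ha m hmh hPm (a.length / 2) le_rfl
      omega
  | succ fuel ih =>
    intro l r hfuel hl hlh hr h1 h2
    by_cases hlr : l ≤ r
    · rw [solveLoop, dif_pos hlr]
      have hb := PySem.Int.floordiv_two_mid_bounds hlr
      set mid := PySem.Int.floordiv (l + r) 2 with hmid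
      have hmid0 : 0 ≤ mid := by omega
      obtain ⟨m0, hm0⟩ : ∃ m0 : Nat, (m0 : Int) = mid := ⟨mid.toNat, by omega⟩
      have hm0h : m0 ≤ a.length / 2 := by omega
      by_cases hchk : solveCheck a t mid = true
      · rw [if_pos hchk]
        have hPm0 : pvP a t m0 := by
          rw [← hm0] at hchk
          exact (check_iff a t m0 (by omega)).1 hchk
        exact ih (mid + 1) r (by omega) (by omega) (by omega) hr
          (Or.inr ⟨m0, by omega, hPm0⟩) h2
      · rw [if_neg hchk]
        have hnPm0 : ¬ pvP a t m0 := by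
          intro hP
          exact hchk ((check_iff a t m0 (by omega)).2 hP ▸ (hm0 ▸ rfl))
        refine ih l (mid - 1) (by omega) hl hlh (by omega) h1 ?_
        intro m hmm hmh hP
        rcases Nat.lt_or_ge m m0 with h | h
        · omega
        · exact hnPm0 (pvP_mono a t ha h (by omega) hP)
    · rw [solveLoop, dif_neg hlr]
      have hMr : ((pvG a t (a.length / 2) : Nat) : Int) ≤ r := by
        by_contra hc
        exact h2 (pvG a t (a.length / 2)) (by omega) hGle hPM
      rcases h1 with h0 | ⟨m, hm, hPm⟩
      · omega
      · have hmh : m ≤ a.length / 2 := by omega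
        have := pvG_max a t ha m hmh hPm (a.length / 2) le_rfl
        omega

-- the two ports agree on any sorted list
lemma pvMain (a : List Int) (target : Int) (ha : a.Pairwise (· ≤ ·)) :
    solveLoop a target 0 (PySem.Int.floordiv ((a.length : Nat) : Int) 2)
    = (PySem.List.pyRange (((a.length : Nat) : Int) - PySem.Int.floordiv ((a.length : Nat) : Int) 2)
          ((a.length : Nat) : Int)).foldl
        (fun i j =>
          if PySem.List.pyGetD a j 0 - PySem.List.pyGetD a i 0 ≥ target then i + 1 else i) 0 := by
  have hfd : PySem.Int.floordiv ((a.length : Nat) : Int) 2 = ((a.length / 2 : Nat) : Int) := by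
    exact_mod_cast PySem.Int.floordiv_natCast a.length 2
  have hstart : ((a.length : Nat) : Int) - ((a.length / 2 : Nat) : Int)
      = ((a.length - a.length / 2 : Nat) : Int) := by
    have : a.length / 2 ≤ a.length := Nat.div_le_self _ _
    omega
  have hend : ((a.length : Nat) : Int) = ((a.length - a.length / 2 + a.length / 2 : Nat) : Int) := by
    have : a.length / 2 ≤ a.length := Nat.div_le_self _ _
    omega
  rw [hfd, hstart]
  conv_rhs => rw [hend]
  rw [fold_eq_pvG a target (a.length / 2) le_rfl]
  exact solveLoop_eq a target ha ((((a.length / 2 : Nat) : Int)) + 1 - 0).toNat 0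
    ((a.length / 2 : Nat) : Int) (by omega) (by omega) (by omega) le_rfl (Or.inl rfl)
    (fun m hm hmh _ => by omega)

-- ===== VERDICT (by name: the statement is the Claim_ definition above) =====
theorem solve_spec : Claim_equal_solve := by
  intro nums target _dom
  unfold Spec_solve solve solve_alt
  exact pvMain (PySem.List.sorted nums id) target
    (by simpa using PySem.List.sorted_pairwise nums id)
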